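-- pv_equiv track=rewrite | github.com/boberle/advent_of_code_2022 | 20/day20.py | swap_right
-- ===== SOURCE A (Python) =====
-- def swap_right(numbers, start, n):
--     for i in range(n):
--         if start+1 < len(numbers):
--             numbers[start], numbers[start+1] = numbers[start+1], numbers[start]
--             start += 1
--         else:
--             numbers[start], numbers[0] = numbers[0], numbers[start]
--             start = 0
--     return numbers
-- ===== SOURCE B (Python) =====
-- def swap_right(numbers, start, n):
--     L = len(numbers)
--     if n <= 0 or L <= 1:
--         return numbers
--     p = start % L
--     k = n % (L * (L - 1))
--     fp = (p + k) % L
--     others = numbers[p+1:] + numbers[:p]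
--     r = k % (L - 1)
--     rot = others[r:] + others[:r]
--     res = rot[L-1-fp:] + [numbers[p]] + rot[:L-1-fp]
--     numbers[:] = res
--     return numbers
-- ===== Notes on version B (the rewrite author's own statement) =====
-- stated objective: alternative
-- what changed: A simulates all n adjacent wrap-around swaps one by one; B computes the final arrangement directly: it reduces n modulo the full period L*(L-1), rotates the L-1 bystander elements once by n mod (L-1) and places the moving element at (start+n) mod L, building the result from three slices.
import Mathlib
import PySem

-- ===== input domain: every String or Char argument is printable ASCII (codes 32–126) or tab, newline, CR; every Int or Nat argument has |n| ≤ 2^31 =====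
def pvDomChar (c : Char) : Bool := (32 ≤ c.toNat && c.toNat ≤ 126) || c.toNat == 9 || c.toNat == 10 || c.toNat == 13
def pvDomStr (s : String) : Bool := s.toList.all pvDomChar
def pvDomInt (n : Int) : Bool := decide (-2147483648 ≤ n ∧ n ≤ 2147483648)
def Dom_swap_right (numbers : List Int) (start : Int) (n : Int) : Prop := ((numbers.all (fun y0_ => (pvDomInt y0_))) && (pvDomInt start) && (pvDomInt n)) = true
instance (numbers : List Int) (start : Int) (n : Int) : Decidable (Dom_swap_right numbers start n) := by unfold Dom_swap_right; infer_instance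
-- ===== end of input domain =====

-- B replaces A's step-by-step simulation of n wrap-around adjacent swaps by a
-- closed-form construction: n is reduced modulo the full period L*(L-1), the L-1
-- bystander elements are rotated once by n mod (L-1), and the moving element is
-- placed at (start+n) mod L.  A mutates `numbers` in place (B assigns
-- numbers[:] = res, reaching the same final list content); the equivalence proved
-- here is about the RETURN value.

-- ===== PORT A =====
-- one iteration of A's loop body: both tuple-assignment swaps; none = IndexError
def stepA (xs : List Int) (s : Int) : Option (List Int × Int) :=
  if s + 1 < (xs.length : Int) then
    match PySem.List.pyGet? xs (s+1), PySem.List.pyGet? xs s with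
    | some a, some b =>
        some (PySem.List.pySetD (PySem.List.pySetD xs s a) (s+1) b, s + 1)
    | _, _ => none
  else
    match PySem.List.pyGet? xs 0, PySem.List.pyGet? xs s with
    | some a, some b =>
        some (PySem.List.pySetD (PySem.List.pySetD xs s a) 0 b, 0)
    | _, _ => none

def simA : Nat → List Int × Int → Option (List Int × Int)
  | 0, st => some st
  | k+1, st => (stepA st.1 st.2).bind (simA k)

def swap_right (numbers : List Int) (start : Int) (n : Int) : List Int :=
  match simA n.toNat (numbers, start) with
  | some st => st.1
  | none => []

def swap_right_alt (numbers : List Int) (start : Int) (n : Int) : List Int :=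
  let L : Int := numbers.length
  if n ≤ 0 ∨ L ≤ 1 then numbers
  else
    let p := PySem.Int.mod start L
    let k := PySem.Int.mod n (L * (L - 1))
    let fp := PySem.Int.mod (p + k) L
    let others := PySem.List.slice numbers (some (p+1)) none ++ PySem.List.slice numbers none (some p)
    let r := PySem.Int.mod k (L - 1)
    let rot := PySem.List.slice others (some r) none ++ PySem.List.slice others none (some r)
    PySem.List.slice rot (some (L-1-fp)) none ++ [PySem.List.pyGetD numbers p 0] ++ PySem.List.slice rot none (some (L-1-fp))

-- ===== PRECONDITION & SPEC =====
-- Pre_ excludes exactly the inputs where A raises IndexError: n ≥ 1 with an empty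
-- list or a start outside Python's valid index range [-len, len).
def Pre_swap_right (numbers : List Int) (start : Int) (n : Int) : Prop :=
  n ≤ 0 ∨ (numbers ≠ [] ∧ -(numbers.length : Int) ≤ start ∧ start < (numbers.length : Int))

instance (numbers : List Int) (start : Int) (n : Int) : Decidable (Pre_swap_right numbers start n) := by
  unfold Pre_swap_right; infer_instance

def pvWitness_swap_right : List Int × Int × Int := ([1, 2, 3, 4], 2, 7)

def Spec_swap_right (numbers : List Int) (start : Int) (n : Int) (out : List Int) : Prop := out = swap_right_alt numbers start n
instance (numbers : List Int) (start : Int) (n : Int) (out : List Int) : Decidable (Spec_swap_right numbers start n out) := by unfold Spec_swap_right; infer_instance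

-- ===== CLAIM (what is proved, stated in full; the proofs are below) =====
def Claim_equal_swap_right : Prop := ∀ (numbers : List Int) (start : Int) (n : Int), Dom_swap_right numbers start n → Pre_swap_right numbers start n → Spec_swap_right numbers start n (swap_right numbers start n)

-- ===== LEMMAS AND PROOFS =====

theorem pyIdx_shift (m : Nat) (i : Int) (h1 : -(m:Int) ≤ i) (h2 : i < 0) :
    PySem.List.pyIdx? m i = PySem.List.pyIdx? m (i + m) := by
  unfold PySem.List.pyIdx?
  split_ifs <;> first | omega | (congr 1; omega)

theorem pyGet_shift (xs : List Int) (i : Int) (h1 : -(xs.length:Int) ≤ i) (h2 : i < 0) :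
    PySem.List.pyGet? xs i = PySem.List.pyGet? xs (i + xs.length) := by
  unfold PySem.List.pyGet?
  rw [pyIdx_shift _ _ h1 h2]

theorem pySetD_shift (xs : List Int) (i : Int) (v : Int) (h1 : -(xs.length:Int) ≤ i) (h2 : i < 0) :
    PySem.List.pySetD xs i v = PySem.List.pySetD xs (i + xs.length) v := by
  unfold PySem.List.pySetD PySem.List.pySet?
  rw [pyIdx_shift _ _ h1 h2]

theorem length_pySetD' (xs : List Int) (i : Int) (v : Int) :
    (PySem.List.pySetD xs i v).length = xs.length := by
  unfold PySem.List.pySetD PySem.List.pySet? PySem.List.pyIdx?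
  split_ifs <;> simp

theorem stepA_neg (xs : List Int) (s : Int) (h1 : -(xs.length:Int) ≤ s) (h2 : s < 0) :
    stepA xs s = (stepA xs (s + xs.length)).map (fun st => (st.1, s + 1)) := by
  have hL : 1 ≤ xs.length := by omega
  by_cases hs : s = -1
  · subst hs
    have e1 : (-1 : Int) + 1 = 0 := by norm_num
    have hcondL : (-1 : Int) + 1 < (xs.length : Int) := by omega
    have hcondR : ¬ ((-1 + (xs.length:Int)) + 1 < (xs.length : Int)) := by omega
    unfold stepA
    rw [if_pos hcondL, if_neg hcondR, e1]
    rw [pyGet_shift xs (-1) h1 h2]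
    rcases hA : PySem.List.pyGet? xs 0 with _ | a <;>
      rcases hB : PySem.List.pyGet? xs (-1 + xs.length) with _ | b <;> simp
    rw [pySetD_shift xs (-1) a h1 h2]
  · have hs2 : s + 1 < 0 := by omega
    have hcondL : s + 1 < (xs.length : Int) := by omega
    have hcondR : (s + (xs.length:Int)) + 1 < (xs.length : Int) := by omega
    unfold stepA
    rw [if_pos hcondL, if_pos hcondR]
    have e2 : s + (xs.length:Int) + 1 = (s + 1) + (xs.length:Int) := by ring
    rw [e2, ← pyGet_shift xs (s+1) (by omega) hs2, ← pyGet_shift xs s h1 h2]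
    rcases hA : PySem.List.pyGet? xs (s+1) with _ | a <;>
      rcases hB : PySem.List.pyGet? xs s with _ | b <;> simp
    rw [pySetD_shift xs s a h1 h2]
    rw [pySetD_shift _ (s+1) b (by rw [length_pySetD']; omega) hs2]
    rw [length_pySetD']

theorem step_mid (t c : Int) (D T : List Int) :
    stepA (D ++ t :: c :: T) (D.length : Int) = some (D ++ c :: t :: T, (D.length : Int) + 1) := by
  have hcond : (D.length : Int) + 1 < ((D ++ t :: c :: T).length : Int) := by
    simp
  have h1 : PySem.List.pyGet? (D ++ t :: c :: T) ((D.length : Int) + 1)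
      = some c := by
    have : ((D.length : Int) + 1) = ((D.length + 1 : Nat) : Int) := by push_cast; ring
    rw [this, PySem.List.pyGet?_natCast]
    simp [List.getElem?_append_right]
  have h2 : PySem.List.pyGet? (D ++ t :: c :: T) ((D.length : Int)) = some t := by
    rw [PySem.List.pyGet?_natCast]
    simp [List.getElem?_append_right]
  unfold stepA
  rw [if_pos hcond, h1, h2]
  dsimp only
  have hs1 : PySem.List.pySetD (D ++ t :: c :: T) (D.length : Int) c = D ++ c :: c :: T := by
    rw [PySem.List.pySetD_natCast]
    simp [List.set_append]
  have hs2 : PySem.List.pySetD (D ++ c :: c :: T) ((D.length : Int) + 1) t = D ++ c :: t :: T := by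
    have : ((D.length : Int) + 1) = ((D.length + 1 : Nat) : Int) := by push_cast; ring
    rw [this, PySem.List.pySetD_natCast]
    simp [List.set_append]
  rw [hs1, hs2]

theorem step_end (t c : Int) (T : List Int) :
    stepA (c :: (T ++ [t])) (((T.length + 1 : Nat) : Int)) = some (t :: (T ++ [c]), 0) := by
  have hlen : (c :: (T ++ [t])).length = T.length + 2 := by simp
  have hcond : ¬ (((T.length + 1 : Nat) : Int) + 1 < ((c :: (T ++ [t])).length : Int)) := by
    simp
  have h1 : PySem.List.pyGet? (c :: (T ++ [t])) 0 = some c := by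
    simp [PySem.List.pyGet?_zero_cons]
  have h2 : PySem.List.pyGet? (c :: (T ++ [t])) ((T.length + 1 : Nat) : Int) = some t := by
    rw [PySem.List.pyGet?_natCast]
    have : (c :: (T ++ [t])) = (c :: T) ++ [t] := by simp
    rw [this]
    simp [List.getElem?_append_right]
  unfold stepA
  rw [if_neg hcond, h1, h2]
  dsimp only
  have hs1 : PySem.List.pySetD (c :: (T ++ [t])) ((T.length + 1 : Nat) : Int) c = c :: (T ++ [c]) := by
    rw [PySem.List.pySetD_natCast]
    have : (c :: (T ++ [t])) = (c :: T) ++ [t] := by simp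
    rw [this]
    simp [List.set_append]
  have hs2 : PySem.List.pySetD (c :: (T ++ [c])) (0 : Int) t = t :: (T ++ [c]) := by
    have : (0 : Int) = ((0 : Nat) : Int) := rfl
    rw [this, PySem.List.pySetD_natCast]
    simp
  rw [hs1, hs2]

theorem step_single (x : Int) (s : Int) (h : s = 0 ∨ s = -1) :
    stepA [x] s = some ([x], 0) := by
  rcases h with h | h <;> subst h <;>
    simp [stepA, PySem.List.pyGet?, PySem.List.pyIdx?, PySem.List.pySetD, PySem.List.pySet?]

theorem stepA_invstep (t : Int) (D T : List Int) (s : Int)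
    (hne : D ++ T ≠ [])
    (hlo : -((D.length + T.length + 1 : Nat) : Int) ≤ s)
    (hhi : s < ((D.length + T.length + 1 : Nat) : Int))
    (hres : s = (D.length : Int) ∨ s = (D.length : Int) - ((D.length + T.length + 1 : Nat) : Int)) :
    ∃ D' T' s', stepA (D ++ t :: T) s = some (D' ++ t :: T', s')
      ∧ T' ++ D' = (T ++ D).rotate 1
      ∧ D'.length + T'.length = D.length + T.length
      ∧ D'.length = (D.length + 1) % (D.length + T.length + 1)
      ∧ -((D.length + T.length + 1 : Nat) : Int) ≤ s'
      ∧ s' < ((D.length + T.length + 1 : Nat) : Int)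
      ∧ (s' = (D'.length : Int) ∨ s' = (D'.length : Int) - ((D.length + T.length + 1 : Nat) : Int)) := by
  have hlen : (D ++ t :: T).length = D.length + T.length + 1 := by simp; try omega
  rcases T with _ | ⟨c, T2⟩
  · -- wrap-around step: tracked element is last
    have hD : D ≠ [] := by simpa using hne
    rcases D with _ | ⟨c, D2⟩
    · exact absurd rfl hD
    have hform : (c :: D2) ++ t :: ([] : List Int) = c :: (D2 ++ [t]) := by simp
    have hcore := step_end t c D2
    have hrot : (D2 ++ [c]) ++ ([] : List Int) = (([] : List Int) ++ c :: D2).rotate 1 := by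
      have := List.rotate_cons_succ D2 c 0
      simpa using this.symm
    by_cases hpos : 0 ≤ s
    · have hs : s = ((c :: D2).length : Int) := by
        rcases hres with h | h
        · exact h
        · exfalso; simp at h ⊢; try omega
      refine ⟨[], D2 ++ [c], 0, ?_, hrot, by simp; try omega, by simp [Nat.mod_self], by omega, by omega, Or.inl (by simp)⟩
      have hs2 : s = ((D2.length + 1 : Nat) : Int) := by simp at hs; omega
      rw [hform, hs2]
      simpa using hcore
    · have hs : s = ((c :: D2).length : Int) - (((c :: D2).length + 0 + 1 : Nat) : Int) := by
        rcases hres with h | h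
        · exfalso; simp at h; omega
        · simpa using h
      have hs' : s = -1 := by simp at hs; omega
      refine ⟨[], D2 ++ [c], 0, ?_, hrot, by simp; try omega, by simp [Nat.mod_self], by omega, by omega, Or.inl (by simp)⟩
      rw [hform]
      rw [stepA_neg _ s (by simpa using hlo) (by omega)]
      have hsL : s + ((c :: (D2 ++ [t])).length : Int) = ((D2.length + 1 : Nat) : Int) := by
        simp; omega
      rw [hsL, hcore]
      simp [hs']
  · -- middle step
    have hcore := step_mid t c D T2
    have hrot : T2 ++ (D ++ [c]) = ((c :: T2) ++ D).rotate 1 := by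
      have h1 : ((c :: T2) ++ D) = c :: (T2 ++ D) := by simp
      rw [h1]
      have := List.rotate_cons_succ (T2 ++ D) c 0
      simpa using this
    have hform : D ++ c :: t :: T2 = (D ++ [c]) ++ t :: T2 := by simp
    have hmod : (D ++ [c]).length = (D.length + 1) % (D.length + (c :: T2).length + 1) := by
      have hlt : D.length + 1 < D.length + (c :: T2).length + 1 := by simp
      rw [Nat.mod_eq_of_lt hlt]; simp
    by_cases hpos : 0 ≤ s
    · have hs : s = (D.length : Int) := by
        rcases hres with h | h
        · exact h
        · exfalso; omega
      refine ⟨D ++ [c], T2, (D.length : Int) + 1, ?_, hrot, (by simp; omega), hmod, (by omega), (by simp at hhi ⊢; try omega), Or.inl (by simp)⟩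
      rw [hs, hcore, hform]
    · have hs : s = (D.length : Int) - ((D.length + (c :: T2).length + 1 : Nat) : Int) := by
        rcases hres with h | h
        · exfalso; omega
        · exact h
      refine ⟨D ++ [c], T2, s + 1, ?_, hrot, (by simp; omega), hmod, (by omega), (by omega), Or.inr (by simp at hs ⊢; omega)⟩
      rw [stepA_neg _ s (by omega) (by omega)]
      have hsL : s + ((D ++ t :: c :: T2).length : Int) = (D.length : Int) := by
        simp at hs ⊢; omega
      rw [hsL, hcore, hform]
      simp

theorem simA_inv (t : Int) (k : Nat) : ∀ (D T : List Int) (s : Int),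
    D ++ T ≠ [] →
    -((D.length + T.length + 1 : Nat) : Int) ≤ s →
    s < ((D.length + T.length + 1 : Nat) : Int) →
    (s = (D.length : Int) ∨ s = (D.length : Int) - ((D.length + T.length + 1 : Nat) : Int)) →
    ∃ D' T' s', simA k (D ++ t :: T, s) = some (D' ++ t :: T', s')
      ∧ T' ++ D' = (T ++ D).rotate k
      ∧ D'.length = (D.length + k) % (D.length + T.length + 1) := by
  induction k with
  | zero =>
    intro D T s hne hlo hhi hres
    have hlt : D.length < D.length + T.length + 1 := by omega
    exact ⟨D, T, s, rfl, by simp, by simp [Nat.mod_eq_of_lt hlt]⟩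
  | succ k ih =>
    intro D T s hne hlo hhi hres
    obtain ⟨D1, T1, s1, hstep, hrot1, hsum1, hlen1, hlo1, hhi1, hres1⟩ :=
      stepA_invstep t D T s hne hlo hhi hres
    have hne1 : D1 ++ T1 ≠ [] := by
      intro h
      have h0 : D1.length + T1.length = 0 := by
        have := congrArg List.length h
        simpa using this
      apply hne
      have hD : D = [] := by rw [← List.length_eq_zero_iff]; omega
      have hT : T = [] := by rw [← List.length_eq_zero_iff]; omega
      simp [hD, hT]
    obtain ⟨D', T', s', hsim, hrot, hlen⟩ :=
      ih D1 T1 s1 hne1 (by rw [hsum1]; exact hlo1) (by rw [hsum1]; exact hhi1)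
        (by rw [hsum1]; exact hres1)
    refine ⟨D', T', s', ?_, ?_, ?_⟩
    · show (stepA (D ++ t :: T) s).bind (simA k) = _
      rw [hstep]
      simpa using hsim
    · rw [hrot, hrot1, List.rotate_rotate]
      congr 1
      omega
    · rw [hlen, hsum1, hlen1, Nat.mod_add_mod]
      congr 1
      omega

theorem simA_single (x : Int) (k : Nat) : ∀ (s : Int), (s = 0 ∨ s = -1) →
    ∃ s', simA k ([x], s) = some ([x], s') := by
  induction k with
  | zero => exact fun s _ => ⟨s, rfl⟩
  | succ k ih =>
    intro s hs
    obtain ⟨s', h⟩ := ih 0 (Or.inl rfl)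
    refine ⟨s', ?_⟩
    show (stepA [x] s).bind (simA k) = _
    rw [step_single x s hs]
    simpa using h

theorem swap_right_eq (numbers : List Int) (start : Int) (n : Int)
    (hpre : Pre_swap_right numbers start n) :
    swap_right numbers start n = swap_right_alt numbers start n := by
  by_cases hn : n ≤ 0
  · have h0 : n.toNat = 0 := by omega
    unfold swap_right swap_right_alt
    rw [h0]
    simp only [simA]
    rw [if_pos (Or.inl hn)]
  · rcases hpre with h | ⟨hne, hlo, hhi⟩
    · omega
    have hL1 : 1 ≤ numbers.length := by
      rcases numbers with _ | ⟨x, rest⟩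
      · exact absurd rfl hne
      · simp
    by_cases hLle : numbers.length ≤ 1
    · -- singleton list: every step is a self-swap
      rcases numbers with _ | ⟨x, rest⟩
      · exact absurd rfl hne
      have hrest : rest = [] := by
        simp only [List.length_cons] at hLle
        rw [← List.length_eq_zero_iff]
        omega
      subst hrest
      have hs : start = 0 ∨ start = -1 := by
        simp only [List.length_cons, List.length_nil] at hlo hhi
        omega
      obtain ⟨s', hsim⟩ := simA_single x n.toNat start hs
      unfold swap_right swap_right_alt
      rw [hsim, if_pos (Or.inr (by simp))]
    · -- main case: length ≥ 2
      have hL2 : 2 ≤ numbers.length := by omega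
      -- the normalised start position fp0
      obtain ⟨fp0, hfp0, hsd, hmodstart⟩ :
          ∃ fp0 : Nat, fp0 < numbers.length ∧
            (start = (fp0 : Int) ∨ start = (fp0 : Int) - (numbers.length : Int)) ∧
            start % (numbers.length : Int) = (fp0 : Int) := by
        by_cases h0 : 0 ≤ start
        · exact ⟨start.toNat, by omega, Or.inl (by omega),
            by rw [Int.emod_eq_of_lt h0 (by omega)]; omega⟩
        · refine ⟨(start + numbers.length).toNat, by omega, Or.inr (by omega), ?_⟩
          have hsh : start % (numbers.length : Int) = (start + numbers.length) % (numbers.length : Int) := by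
            conv_rhs => rw [show start + (numbers.length : Int) = start + (numbers.length : Int) * 1 by ring]
            rw [Int.add_mul_emod_self_left]
          rw [hsh, Int.emod_eq_of_lt (by omega) (by omega)]
          omega
      have hflt : fp0 < numbers.length := hfp0
      obtain ⟨t, ht⟩ : ∃ t : Int, numbers[fp0]'hflt = t := ⟨_, rfl⟩
      set D0 := numbers.take fp0 with hD0def
      set T0 := numbers.drop (fp0 + 1) with hT0def
      have hdecomp : numbers = D0 ++ t :: T0 := by
        conv_lhs => rw [← List.take_append_drop fp0 numbers]
        rw [List.drop_eq_getElem_cons hflt, ht]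
      have hD0 : D0.length = fp0 := by simp [hD0def]; omega
      have hT0 : T0.length = numbers.length - fp0 - 1 := by
        rw [hT0def, List.length_drop]
        omega
      have hsum : D0.length + T0.length + 1 = numbers.length := by omega
      have hne0 : D0 ++ T0 ≠ [] := by
        intro h
        have hc := congrArg List.length h
        rw [List.length_append, hD0, hT0] at hc
        simp at hc
        omega
      set N := n.toNat with hNdef
      obtain ⟨D', T', s', hsim, hrot, hDlen'⟩ :=
        simA_inv t N D0 T0 start hne0 (by rw [hsum]; exact hlo) (by rw [hsum]; exact hhi)
          (by rw [hsum, hD0]; exact hsd)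
      set Lc := numbers.length with hLc
      set fpk := (fp0 + N) % Lc with hfpk
      have hfpklt : fpk < Lc := Nat.mod_lt _ (by omega)
      set R := (T0 ++ D0).rotate N with hR
      have hlenO : (T0 ++ D0).length = Lc - 1 := by simp; omega
      have hRlen : R.length = Lc - 1 := by
        rw [hR, List.length_rotate]
        exact hlenO
      have hT'D' : T'.length + D'.length = Lc - 1 := by
        have hc := congrArg List.length hrot
        simp only [List.length_append] at hc
        rw [hRlen] at hc
        exact hc
      have hD'len : D'.length = fpk := by
        rw [hDlen', hsum, hD0]
      have hT'len : T'.length = Lc - 1 - fpk := by omega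
      have hD'eq : D' = R.drop T'.length := by rw [← hrot, List.drop_left]
      have hT'eq : T' = R.take T'.length := by rw [← hrot, List.take_left]
      -- LHS
      have hlhs : swap_right numbers start n = D' ++ t :: T' := by
        unfold swap_right
        have hsim' : simA n.toNat (numbers, start) = some (D' ++ t :: T', s') := by
          rw [← hNdef, hdecomp]
          exact hsim
        rw [hsim']
      -- RHS pieces
      have hcond : ¬ (n ≤ 0 ∨ (numbers.length : Int) ≤ 1) := by
        rintro (h | h)
        · omega
        · rw [← hLc] at h; omega
      have hLpos : (0 : Int) < (Lc : Int) := by omega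
      have hp : PySem.Int.mod start (numbers.length : Int) = ((fp0 : Nat) : Int) := by
        rw [PySem.Int.mod_eq_emod_of_pos (by rw [← hLc]; omega)]
        exact hmodstart
      have hneq : n = (N : Int) := by omega
      set kN := N % (Lc * (Lc - 1)) with hkN
      have hcastLL : (numbers.length : Int) * ((numbers.length : Int) - 1) = ((Lc * (Lc - 1) : Nat) : Int) := by
        rw [← hLc]
        have h1 : ((Lc - 1 : Nat) : Int) = (Lc : Int) - 1 := by omega
        push_cast [h1]
        ring
      have hLL : 0 < Lc * (Lc - 1) := Nat.mul_pos (by omega) (by omega)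
      have hk : PySem.Int.mod n ((numbers.length : Int) * ((numbers.length : Int) - 1)) = ((kN : Nat) : Int) := by
        rw [PySem.Int.mod_eq_emod_of_pos (by rw [hcastLL]; exact_mod_cast hLL)]
        rw [hneq, hcastLL, hkN]
        exact (Int.natCast_mod _ _).symm
      have hkmodL : kN % Lc = N % Lc := Nat.mod_mod_of_dvd N (dvd_mul_right Lc (Lc - 1))
      have hfp : PySem.Int.mod (((fp0 : Nat) : Int) + ((kN : Nat) : Int)) (numbers.length : Int) = ((fpk : Nat) : Int) := by
        rw [PySem.Int.mod_eq_emod_of_pos (by rw [← hLc]; omega)]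
        have hcc : ((fp0 : Int) + (kN : Int)) = (((fp0 + kN : Nat)) : Int) := by push_cast; ring
        rw [hcc, ← hLc, ← Int.natCast_mod]
        congr 1
        rw [Nat.add_mod fp0 kN, hkmodL, ← Nat.add_mod, ← hfpk]
      have hothers : PySem.List.slice numbers (some (((fp0 : Nat) : Int) + 1)) none ++ PySem.List.slice numbers none (some ((fp0 : Nat) : Int)) = T0 ++ D0 := by
        have h1 : ((fp0 : Int) + 1) = (((fp0 + 1 : Nat)) : Int) := by push_cast; ring
        rw [h1, PySem.List.slice_from_natCast, PySem.List.slice_to_natCast, ← hT0def, ← hD0def]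
      set rN := N % (Lc - 1) with hrNdef
      have hkmodm : kN % (Lc - 1) = rN := by
        rw [hkN, hrNdef]
        exact Nat.mod_mod_of_dvd N (dvd_mul_left (Lc - 1) Lc)
      have hr : PySem.Int.mod ((kN : Nat) : Int) ((numbers.length : Int) - 1) = ((rN : Nat) : Int) := by
        have hm1 : ((numbers.length : Int) - 1) = ((Lc - 1 : Nat) : Int) := by rw [← hLc]; omega
        rw [hm1, PySem.Int.mod_eq_emod_of_pos (by exact_mod_cast (by omega : 0 < Lc - 1))]
        rw [← Int.natCast_mod]
        exact_mod_cast congrArg (Nat.cast : Nat → Int) hkmodm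
      have hrotv : PySem.List.slice (T0 ++ D0) (some ((rN : Nat) : Int)) none ++ PySem.List.slice (T0 ++ D0) none (some ((rN : Nat) : Int)) = R := by
        rw [PySem.List.slice_from_natCast, PySem.List.slice_to_natCast]
        have hle : rN ≤ (T0 ++ D0).length := by
          have := Nat.mod_lt N (y := Lc - 1) (by omega)
          omega
        rw [← List.rotate_eq_drop_append_take hle, hR]
        have hrn2 : rN = N % (T0 ++ D0).length := by rw [hlenO, hrNdef]
        rw [hrn2, List.rotate_mod]
      have htD : PySem.List.pyGetD numbers ((fp0 : Nat) : Int) 0 = t := by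
        rw [PySem.List.pyGetD_natCast, List.getD_eq_getElem _ _ hflt, ht]
      have hcastfp : (numbers.length : Int) - 1 - ((fpk : Nat) : Int) = ((Lc - 1 - fpk : Nat) : Int) := by
        rw [← hLc]; omega
      have hrhs : swap_right_alt numbers start n = R.drop (Lc - 1 - fpk) ++ [t] ++ R.take (Lc - 1 - fpk) := by
        simp only [swap_right_alt]
        rw [if_neg hcond, hp, hk, hfp, hothers, hr, hrotv, htD, hcastfp,
          PySem.List.slice_from_natCast, PySem.List.slice_to_natCast]
      rw [hlhs, hrhs, hD'eq, hT'eq, hT'len]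
      simp

-- ===== VERDICT (by name: the statement is the Claim_ definition above) =====
theorem swap_right_spec : Claim_equal_swap_right := by
  unfold Claim_equal_swap_right
  intro numbers start n _ hpre
  unfold Spec_swap_right
  exact swap_right_eq numbers start n hpre
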